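-- pv_equiv track=rewrite | github.com/schlogl2017/PauloSSchlogl | sequence_utils.py | get_kmer_clumps
-- ===== SOURCE A (Python) =====
-- from collections import defaultdict, Counter
-- from collections import defaultdict, Counter
--
-- def get_strand_complement(sequence):
--     """Returns the complement strand of the genome.
--
--      Inputs:
--         sequence - string representing the sequence
--
--     Outputs:
--
--         sequence - string representing the complement of
--                    the string.
--     """
--     # make the sequence upper case
--     seq = sequence.upper()
--     # table to change the complement characters
--     change = str.maketrans('ACGT', 'TGCA')
--     return seq.translate(change)
--
-- def get_reverse_complement(sequence):
--     """
--     Returns the reverse complement strand of the genome.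
--
--     Inputs:
--
--         sequence - string representing the sequence.
--
--     Outputs:
--
--         reversed_complement_sequence - string representing the reversed
--                                        sequence complement.
--     """
--     return get_strand_complement(sequence)[::-1]
--
-- def kmer_positions(sequence, alphabet, k):
--     """ returns the position of all k-mers in sequence as a dictionary"""
--     mer_position = defaultdict(list)
--     for i in range(1, len(sequence) - k + 1):
--         kmer = sequence[i:i + k]
--         if all(base in set(alphabet) for base in kmer):
--             mer_position[kmer] = mer_position.get(kmer, []) + [i]
--     # combine kmers with their reverse complements
--     pair_position = defaultdict(list)
--     for kmer, pos in mer_position.items():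
--         krev = get_reverse_complement(kmer)
--         if kmer < krev:
--             pair_position[kmer] = sorted(pos + mer_position.get(krev, []))
--         elif krev < kmer:
--             pair_position[krev] = sorted(mer_position.get(krev, []) + pos)
--         else:
--             pair_position[kmer] = pos
--     return pair_position
--
-- def get_kmer_clumps(sequence, alphabet, k, window, times):
--     clumps = defaultdict(list)
--     kmers = kmer_positions(sequence, alphabet, k)
--     for kmer, pos in kmers.items():
--         clumps[kmer] = clumps.get(kmer, [])
--         for i in range(len(pos) - times):
--             end = i + times - 1
--             while (pos[end] - pos[i]) <= window - k:
--                 end += 1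
--                 if end >= len(pos):
--                     break
--             if end - i >= times:
--                 clumps[kmer].append((pos[i], end - i))
--     return clumps
-- ===== SOURCE B (Python) =====
-- from collections import defaultdict
--
-- def _revcomp(kmer):
--     comp = {'A': 'T', 'C': 'G', 'G': 'C', 'T': 'A'}
--     out = []
--     for c in reversed(kmer):
--         u = c.upper()
--         out.append(comp.get(u, u))
--     return ''.join(out)
--
-- def get_kmer_clumps(sequence, alphabet, k, window, times):
--     allowed = set(alphabet)
--     # stage 1: explicit list of (kmer, position) hits
--     hits = [(sequence[i:i + k], i)
--             for i in range(1, len(sequence) - k + 1)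
--             if all(c in allowed for c in sequence[i:i + k])]
--     # stage 2: group positions per kmer (one append per hit)
--     pos_by = {}
--     for km, i in hits:
--         pos_by.setdefault(km, []).append(i)
--     # stage 3: canonical key = min(kmer, revcomp); clump extents by binary search
--     result = defaultdict(list)
--     for km, mine in pos_by.items():
--         krev = _revcomp(km)
--         if km == krev:
--             key, pos = km, mine
--         else:
--             key, pos = min(km, krev), sorted(mine + pos_by.get(krev, []))
--         m = len(pos)
--         out = []
--         for i in range(m - times):
--             bound = pos[i] + window - k
--             lo, hi = 0, m      # first index with pos[.] > bound
--             while lo < hi: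
--                 mid = (lo + hi) // 2
--                 if pos[mid] <= bound:
--                     lo = mid + 1
--                 else:
--                     hi = mid
--             if lo - i >= times:
--                 out.append((pos[i], lo - i))
--         result[key] = out
--     return result
-- ===== Notes on version B (the rewrite author's own statement) =====
-- stated objective: faster
-- what changed: B stages the work differently: it builds an explicit (kmer, position) hit list, groups it into per-kmer position lists with one append per hit (instead of A's whole-list re-concatenation), folds A's three-branch reverse-complement pairing into a single canonical-key insert, and finds each clump extent by binary search over the sorted position list instead of A's restart-from-scratch inner while loop.
-- outside the precondition, e.g. on get_kmer_clumps('', 'ACGT', 2, 6, -1): A returns {}, B returns {}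
import Mathlib
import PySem

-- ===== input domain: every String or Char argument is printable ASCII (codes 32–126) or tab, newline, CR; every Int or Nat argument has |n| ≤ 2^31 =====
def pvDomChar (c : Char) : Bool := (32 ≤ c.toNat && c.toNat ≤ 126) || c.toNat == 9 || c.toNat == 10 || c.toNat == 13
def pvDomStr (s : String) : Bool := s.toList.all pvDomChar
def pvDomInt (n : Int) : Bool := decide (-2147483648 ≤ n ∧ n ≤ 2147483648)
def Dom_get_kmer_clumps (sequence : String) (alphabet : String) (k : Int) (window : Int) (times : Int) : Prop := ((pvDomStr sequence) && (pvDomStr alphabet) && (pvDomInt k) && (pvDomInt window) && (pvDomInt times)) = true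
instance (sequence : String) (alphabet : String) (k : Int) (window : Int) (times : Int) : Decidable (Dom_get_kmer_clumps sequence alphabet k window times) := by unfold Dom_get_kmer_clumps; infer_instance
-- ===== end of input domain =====

-- B stages the computation differently: an explicit hit list grouped once per kmer (one append
-- per hit instead of A's whole-list re-concatenation), a single canonical-key pass replacing A's
-- three-branch pairing loop, and clump extents found by binary search over each sorted position
-- list instead of A's restart-from-scratch inner while loop; same return value on Pre_ (times ≥ 1).

-- ===== PORT A =====
-- str.maketrans('ACGT', 'TGCA') applied to one character (exact: other characters unchanged)
def pvCompl (c : Char) : Char :=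
  if c = 'A' then 'T' else if c = 'C' then 'G' else if c = 'G' then 'C' else if c = 'T' then 'A' else c

-- get_strand_complement: sequence.upper().translate(change)  (translate ported by hand, exact)
def pvStrandComplement (s : String) : String :=
  String.ofList ((PySem.Chars.upper s.toList).map pvCompl)

-- get_reverse_complement: get_strand_complement(sequence)[::-1]
def pvReverseComplement (s : String) : String :=
  String.ofList (pvStrandComplement s).toList.reverse

-- first loop of kmer_positions (A): mer_position[kmer] = mer_position.get(kmer, []) + [i]
def pvMerA (sequence : String) (alphabet : String) (k : Int) : PySem.Dict String (List Int) :=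
  (PySem.List.pyRange 1 (PySem.Str.len sequence - k + 1) 1).foldl
    (fun d i =>
      let kmer := PySem.Str.slice sequence (some i) (some (i + k))
      if kmer.toList.all (fun base => (PySem.Set.ofList alphabet.toList).contains base)
      then d.insert kmer (d.getD kmer [] ++ [i])
      else d)
    PySem.Dict.empty

-- second loop of kmer_positions (A): combine each kmer with its reverse complement
def pvPairA (mer : PySem.Dict String (List Int)) : PySem.Dict String (List Int) :=
  mer.items.foldl
    (fun p kv =>
      let krev := pvReverseComplement kv.1
      if kv.1 < krev then p.insert kv.1 (PySem.List.sorted (kv.2 ++ mer.getD krev []) (fun x => x))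
      else if krev < kv.1 then p.insert krev (PySem.List.sorted (mer.getD krev [] ++ kv.2) (fun x => x))
      else p.insert kv.1 kv.2)
    PySem.Dict.empty

-- the while loop 'while pos[end] - pos[i] <= window - k: end += 1; if end >= len(pos): break'.
-- Python reads pos[end] before the bound test; under Pre_ (times ≥ 1) end < len(pos) at every
-- read, so checking the bound first is exact.
def pvAdvance (pos : List Int) (pi : Int) (c : Int) (e : Nat) : Nat :=
  if h : e < pos.length ∧ pos.getD e 0 - pi ≤ c then pvAdvance pos pi c (e + 1) else e
termination_by pos.length - e
decreasing_by omega

-- A's per-kmer loop, starting from clumps.get(kmer, []); (i + times - 1).toNat is exact under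
-- Pre_ (times ≥ 1: the index is ≥ 0, no Python negative-index wraparound)
def pvClumpA (start : List (Int × Int)) (pos : List Int) (c : Int) (t : Int) : List (Int × Int) :=
  (PySem.List.pyRange 0 (PySem.List.len pos - t) 1).foldl
    (fun out i =>
      let e := pvAdvance pos (PySem.List.pyGetD pos i 0) c (i + t - 1).toNat
      if t ≤ (e : Int) - i then out ++ [(PySem.List.pyGetD pos i 0, (e : Int) - i)] else out)
    start

def get_kmer_clumps (sequence : String) (alphabet : String) (k : Int) (window : Int) (times : Int) : List (String × List (Int × Int)) :=
  ((pvPairA (pvMerA sequence alphabet k)).items.foldl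
      (fun clumps kv => clumps.insert kv.1 (pvClumpA (clumps.getD kv.1 []) kv.2 (window - k) times))
      (PySem.Dict.empty : PySem.Dict String (List (Int × Int)))).items

-- ===== PORT B =====
-- Source B _revcomp: complement table as a dict, reversed traversal, per-char upper
def pvComplTable : PySem.Dict Char Char :=
  PySem.Dict.ofList [('A', 'T'), ('C', 'G'), ('G', 'C'), ('T', 'A')]

def pvRevCompB (kmer : String) : String :=
  String.ofList (kmer.toList.reverse.map (fun c =>
    let u := PySem.Chars.upperChar c
    pvComplTable.getD u u))

-- stage 1 of Source B: the explicit hit list [(kmer, i), ...]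
def pvHitsB (sequence : String) (alphabet : String) (k : Int) : List (String × Int) :=
  let allowed := PySem.Set.ofList alphabet.toList
  ((PySem.List.pyRange 1 (PySem.Str.len sequence - k + 1) 1).filter
      (fun i => (PySem.Str.slice sequence (some i) (some (i + k))).toList.all
        (fun c => allowed.contains c))).map
    (fun i => (PySem.Str.slice sequence (some i) (some (i + k)), i))

-- stage 2 of Source B: pos_by.setdefault(km, []).append(i)
def pvGroupB (hits : List (String × Int)) : PySem.Dict String (List Int) :=
  hits.foldl
    (fun d p =>
      let d' := d.setdefault p.1 []
      d'.insert p.1 (d'.getD p.1 [] ++ [p.2]))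
    PySem.Dict.empty

-- Source B's hand-written binary search: first index with pos[.] > bound
def pvBisect (pos : List Int) (bound : Int) (lo hi : Nat) : Nat :=
  if h : lo < hi then
    let mid := (lo + hi) / 2
    if pos.getD mid 0 ≤ bound then pvBisect pos bound (mid + 1) hi else pvBisect pos bound lo mid
  else lo
termination_by hi - lo
decreasing_by all_goals omega

-- Source B's inner loop: clump extent at each start found by binary search
def pvClumpSearch (pos : List Int) (c : Int) (t : Int) : List (Int × Int) :=
  (PySem.List.pyRange 0 (PySem.List.len pos - t) 1).foldl
    (fun out i =>
      let bound := PySem.List.pyGetD pos i 0 + c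
      let lo := pvBisect pos bound 0 pos.length
      if t ≤ (lo : Int) - i then out ++ [(PySem.List.pyGetD pos i 0, (lo : Int) - i)] else out)
    []

def get_kmer_clumps_alt (sequence : String) (alphabet : String) (k : Int) (window : Int) (times : Int) : List (String × List (Int × Int)) :=
  let posBy := pvGroupB (pvHitsB sequence alphabet k)
  (posBy.items.foldl
      (fun r kv =>
        let krev := pvRevCompB kv.1
        let kp := if kv.1 == krev then (kv.1, kv.2)
                  else (min kv.1 krev, PySem.List.sorted (kv.2 ++ posBy.getD krev []) (fun x => x))
        r.insert kp.1 (pvClumpSearch kp.2 (window - k) times))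
      PySem.Dict.empty).items

-- ===== PRECONDITION & SPEC =====
-- Pre_ excludes times ≤ 0: for negative times A raises IndexError whenever any k-mer occurs
-- (and returns {} otherwise), and for times = 0 A's value rests on Python's negative-index
-- wraparound (pos[-1]) over a degenerate request, a corner no caller would specify.
def Pre_get_kmer_clumps (sequence : String) (alphabet : String) (k : Int) (window : Int) (times : Int) : Prop := 1 ≤ times
instance (sequence : String) (alphabet : String) (k : Int) (window : Int) (times : Int) : Decidable (Pre_get_kmer_clumps sequence alphabet k window times) := by unfold Pre_get_kmer_clumps; infer_instance

def pvWitness_get_kmer_clumps : String × String × Int × Int × Int := ("ACGTACGTACGAC", "ACGT", 2, 6, 2)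

def Spec_get_kmer_clumps (sequence : String) (alphabet : String) (k : Int) (window : Int) (times : Int) (out : List (String × List (Int × Int))) : Prop := out = get_kmer_clumps_alt sequence alphabet k window times
instance (sequence : String) (alphabet : String) (k : Int) (window : Int) (times : Int) (out : List (String × List (Int × Int))) : Decidable (Spec_get_kmer_clumps sequence alphabet k window times out) := by unfold Spec_get_kmer_clumps; infer_instance

-- ===== CLAIM (what is proved, stated in full; the proofs are below) =====
def Claim_equal_get_kmer_clumps : Prop := ∀ (sequence : String) (alphabet : String) (k : Int) (window : Int) (times : Int), Dom_get_kmer_clumps sequence alphabet k window times → Pre_get_kmer_clumps sequence alphabet k window times → Spec_get_kmer_clumps sequence alphabet k window times (get_kmer_clumps sequence alphabet k window times)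

-- ===== LEMMAS AND PROOFS =====

-- positions of kmer c recovered from the hit list (proof-side abbreviation)
def pvPos (hits : List (String × Int)) (c : String) : List Int :=
  (hits.filter (fun p => p.1 == c)).map (·.2)

-- canonical key and merged position list per kmer (proof-side; mirror B's branch)
def pvKeyOf (kv : String × List Int) : String :=
  if kv.1 == pvReverseComplement kv.1 then kv.1 else min kv.1 (pvReverseComplement kv.1)

def pvValOf (hits : List (String × Int)) (kv : String × List Int) : List Int :=
  if kv.1 == pvReverseComplement kv.1 then kv.2
  else PySem.List.sorted (kv.2 ++ pvPos hits (pvReverseComplement kv.1)) (fun x => x)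

-- Source B's complement table looks up exactly A's translate map
theorem pvTable_getD (u : Char) : pvComplTable.getD u u = pvCompl u := by
  have h : pvComplTable = PySem.Dict.mk [('A', 'T'), ('C', 'G'), ('G', 'C'), ('T', 'A')] := by decide
  have hnil : (PySem.Dict.mk ([] : List (Char × Char))).get? u = none := rfl
  rw [h, pvCompl, PySem.Dict.getD_eq_get?_getD]
  simp only [PySem.Dict.get?_mk_cons, hnil]
  by_cases h1 : u = 'A'
  · subst h1; rfl
  by_cases h2 : u = 'C'
  · subst h2; rfl
  by_cases h3 : u = 'G'
  · subst h3; rfl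
  by_cases h4 : u = 'T'
  · subst h4; rfl
  rw [if_neg (fun he => h1 (beq_iff_eq.mp he).symm), if_neg (fun he => h2 (beq_iff_eq.mp he).symm),
    if_neg (fun he => h3 (beq_iff_eq.mp he).symm), if_neg (fun he => h4 (beq_iff_eq.mp he).symm),
    if_neg h1, if_neg h2, if_neg h3, if_neg h4]
  rfl

theorem pvRevCompB_eq (s : String) : pvRevCompB s = pvReverseComplement s := by
  unfold pvRevCompB pvReverseComplement pvStrandComplement
  simp only [pvTable_getD, PySem.Chars.upper, String.toList_ofList, List.map_map, List.map_reverse]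
  rfl

-- A's first loop, re-expressed as the modify-fold over B's hit list
theorem merA_eq (sequence alphabet : String) (k : Int) :
    pvMerA sequence alphabet k
      = (pvHitsB sequence alphabet k).foldl (fun d p => d.modify p.1 [] (· ++ [p.2]))
          PySem.Dict.empty := by
  unfold pvMerA pvHitsB
  rw [List.foldl_map]
  rw [PySem.List.foldl_if_eq_foldl_filter]
  rfl

-- B's setdefault-then-append grouping is the same modify-fold
theorem groupB_eq (hits : List (String × Int)) :
    pvGroupB hits = hits.foldl (fun d p => d.modify p.1 [] (· ++ [p.2])) PySem.Dict.empty := by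
  unfold pvGroupB
  apply PySem.List.foldl_congr_mem
  intro d p _
  dsimp only
  show _ = d.insert p.1 (d.getD p.1 [] ++ [p.2])
  by_cases hc : d.contains p.1 = true
  · rw [PySem.Dict.setdefault_of_contains _ _ hc]
  · rw [PySem.Dict.setdefault_of_not_contains _ _ (by simpa using hc)]
    rw [PySem.Dict.getD_insert_self, PySem.Dict.insert_insert_self]
    rw [PySem.Dict.getD_of_not_contains _ _ (by simpa using hc)]

theorem merFold_getD (hits : List (String × Int)) (c : String) :
    (hits.foldl (fun d p => d.modify p.1 [] (· ++ [p.2])) PySem.Dict.empty).getD c []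
      = pvPos hits c := by
  simpa [pvPos] using PySem.Dict.getD_foldl_modify_append hits PySem.Dict.empty c

theorem merFold_nodup (hits : List (String × Int)) :
    (hits.foldl (fun d p => d.modify p.1 [] (· ++ [p.2])) PySem.Dict.empty).keys.Nodup :=
  PySem.Dict.nodup_keys_foldl_modify_key hits Prod.fst [] (fun _ x => (· ++ [x.2]))
    PySem.Dict.empty (by simp)

theorem pvPos_hits_sorted (sequence alphabet : String) (k : Int) (c : String) :
    (pvPos (pvHitsB sequence alphabet k) c).Pairwise (· < ·) := by
  have h1 : List.Sublist (pvPos (pvHitsB sequence alphabet k) c)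
      ((pvHitsB sequence alphabet k).map (·.2)) :=
    List.Sublist.map _ List.filter_sublist
  have h2 : ((pvHitsB sequence alphabet k).map (·.2)).Sublist
      (PySem.List.pyRange 1 (PySem.Str.len sequence - k + 1) 1) := by
    unfold pvHitsB
    rw [List.map_map]
    have hid : ((·.2 : String × Int → Int) ∘
        fun i => (PySem.Str.slice sequence (some i) (some (i + k)), i)) = id := rfl
    rw [hid, List.map_id]
    exact List.filter_sublist
  exact ((PySem.List.pairwise_lt_pyRange_one _ _).sublist (h1.trans h2))

-- sorted prefix characterisation: pos[j] ≤ b exactly below the count of elements ≤ b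
theorem countP_char (pos : List Int) (b : Int) (hs : pos.Pairwise (· ≤ ·)) :
    ∀ j, j < pos.length →
      (pos.getD j 0 ≤ b ↔ j < pos.countP (fun x => decide (x ≤ b))) := by
  induction pos with
  | nil => intro j hj; cases hj
  | cons x rest ih =>
    rw [List.pairwise_cons] at hs
    intro j hj
    have hcnt : (x :: rest).countP (fun x => decide (x ≤ b))
        = (if x ≤ b then 1 else 0) + rest.countP (fun x => decide (x ≤ b)) := by
      rw [List.countP_cons]
      split_ifs <;> simp_all <;> omega
    cases j with
    | zero =>
      simp only [List.getD_cons_zero, hcnt]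
      constructor
      · intro hx; rw [if_pos hx]; omega
      · intro hlt
        by_contra hx
        rw [if_neg hx] at hlt
        have : rest.countP (fun x => decide (x ≤ b)) = 0 := by
          rw [List.countP_eq_zero]
          intro y hy
          simp only [decide_eq_true_eq]
          have := hs.1 y hy
          omega
        omega
    | succ j =>
      simp only [List.getD_cons_succ, hcnt]
      simp only [List.length_cons, Nat.succ_lt_succ_iff] at hj
      by_cases hx : x ≤ b
      · rw [if_pos hx]
        rw [ih hs.2 j hj]
        omega
      · rw [if_neg hx]
        have h0 : rest.countP (fun x => decide (x ≤ b)) = 0 := by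
          rw [List.countP_eq_zero]
          intro y hy
          simp only [decide_eq_true_eq]
          have := hs.1 y hy
          omega
        constructor
        · intro hle
          exfalso
          rw [List.getD_eq_getElem rest 0 hj] at hle
          have := hs.1 _ (List.getElem_mem hj)
          omega
        · intro h; omega

-- A's linear advance lands at max(start, count of elements ≤ pi + c)
theorem pvAdvance_eq (pos : List Int) (pi c : Int) (hs : pos.Pairwise (· ≤ ·)) :
    ∀ s, pvAdvance pos pi c s = max s (pos.countP (fun x => decide (x ≤ pi + c))) := by
  have hcle : pos.countP (fun x => decide (x ≤ pi + c)) ≤ pos.length := List.countP_le_length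
  intro s
  induction s using pvAdvance.induct pos pi c with
  | case1 e h ih =>
    rw [pvAdvance, dif_pos h]
    have he : e < pos.countP (fun x => decide (x ≤ pi + c)) :=
      (countP_char pos (pi + c) hs e h.1).mp (by omega)
    rw [ih]; omega
  | case2 e h =>
    rw [pvAdvance, dif_neg h]
    rcases Nat.lt_or_ge e pos.length with hlt | hge
    · have : ¬ pos.getD e 0 - pi ≤ c := by tauto
      have := (countP_char pos (pi + c) hs e hlt).not.mp (by omega)
      omega
    · omega

-- Source B's binary search lands at the same count
theorem pvBisect_eq (pos : List Int) (b : Int) (hs : pos.Pairwise (· ≤ ·)) :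
    ∀ lo hi, lo ≤ pos.countP (fun x => decide (x ≤ b)) →
      pos.countP (fun x => decide (x ≤ b)) ≤ hi → hi ≤ pos.length →
      pvBisect pos b lo hi = pos.countP (fun x => decide (x ≤ b)) := by
  intro lo hi
  induction lo, hi using pvBisect.induct pos b with
  | case1 lo hi h mid hle ih =>
    intro h1 h2 h3
    rw [pvBisect, dif_pos h]
    have hmid : mid < pos.length := by omega
    have := (countP_char pos b hs mid hmid).mp hle
    show (if pos.getD ((lo + hi) / 2) 0 ≤ b then pvBisect pos b ((lo + hi) / 2 + 1) hi
        else pvBisect pos b lo ((lo + hi) / 2)) = _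
    rw [if_pos (show pos.getD ((lo + hi) / 2) 0 ≤ b from hle)]
    exact ih (by omega) h2 h3
  | case2 lo hi h mid hgt ih =>
    intro h1 h2 h3
    rw [pvBisect, dif_pos h]
    have hmid : mid < pos.length := by omega
    have hc : ¬ mid < pos.countP (fun x => decide (x ≤ b)) :=
      (countP_char pos b hs mid hmid).not.mp hgt
    show (if pos.getD ((lo + hi) / 2) 0 ≤ b then pvBisect pos b ((lo + hi) / 2 + 1) hi
        else pvBisect pos b lo ((lo + hi) / 2)) = _
    rw [if_neg (show ¬ pos.getD ((lo + hi) / 2) 0 ≤ b from hgt)]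
    exact ih h1 (by omega) (by omega)
  | case3 lo hi h =>
    intro h1 h2 h3
    rw [pvBisect, dif_neg h]
    omega

-- on a sorted position list the two clump computations agree
theorem clumpA_eq_search (pos : List Int) (c t : Int) (hs : pos.Pairwise (· ≤ ·)) (ht : 1 ≤ t) :
    pvClumpA [] pos c t = pvClumpSearch pos c t := by
  unfold pvClumpA pvClumpSearch
  apply PySem.List.foldl_congr_mem
  intro out i hi
  have hib := PySem.List.mem_pyRange_one.mp hi
  dsimp only
  set pi := PySem.List.pyGetD pos i 0 with hpi
  set cnt := pos.countP (fun x => decide (x ≤ pi + c)) with hcnt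
  have hcle : cnt ≤ pos.length := List.countP_le_length
  have hlen : PySem.List.len pos = (pos.length : Int) := by simp
  rw [pvAdvance_eq pos pi c hs, pvBisect_eq pos (pi + c) hs 0 pos.length (by omega) hcle le_rfl]
  have htn : (((i + t - 1).toNat : Nat) : Int) = i + t - 1 := Int.toNat_of_nonneg (by omega)
  rcases le_total ((i + t - 1).toNat) cnt with hc1 | hc1
  · rw [max_eq_right hc1]
  · rw [max_eq_left hc1]
    have : ¬ t ≤ ((i + t - 1).toNat : Int) - i := by omega
    rw [if_neg this, if_neg (by omega)]

-- A's clump loop over fresh distinct keys never finds a previous entry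
theorem outer_start (c t : Int) :
    ∀ (l : List (String × List Int)) (d : PySem.Dict String (List (Int × Int))),
      (∀ p ∈ l, d.contains p.1 = false) → (l.map (·.1)).Nodup →
      l.foldl (fun cl kv => cl.insert kv.1 (pvClumpA (cl.getD kv.1 []) kv.2 c t)) d
        = l.foldl (fun cl kv => cl.insert kv.1 (pvClumpA [] kv.2 c t)) d := by
  intro l
  induction l with
  | nil => intro d _ _; rfl
  | cons kv rest ih =>
    intro d hfresh hnd
    simp only [List.foldl_cons]
    rw [PySem.Dict.getD_of_not_contains d [] (hfresh kv List.mem_cons_self)]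
    simp only [List.map_cons, List.nodup_cons] at hnd
    refine ih _ ?_ hnd.2
    intro p hp
    rw [PySem.Dict.contains_insert]
    have hne : p.1 ≠ kv.1 := fun h => hnd.1 (h ▸ List.mem_map_of_mem hp)
    simp [hne, hfresh p (List.mem_cons_of_mem kv hp)]

-- every value inserted by a fold of this shape satisfies P
theorem pv_values_fold_prop {κ ν β : Type} [BEq κ] [LawfulBEq κ] (P : ν → Prop) :
    ∀ (l : List β) (d : PySem.Dict κ ν) (key : β → κ) (f : β → ν),
      (∀ w ∈ d.values, P w) → (∀ x ∈ l, P (f x)) →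
      ∀ w ∈ (l.foldl (fun d x => d.insert (key x) (f x)) d).values, P w := by
  intro l
  induction l with
  | nil => intro d key f hd _ w hw; exact hd w hw
  | cons x rest ih =>
    intro d key f hd hl w hw
    refine ih (d.insert (key x) (f x)) key f ?_ (fun y hy => hl y (List.mem_cons_of_mem x hy)) w hw
    intro v hv
    rcases PySem.Dict.mem_values_insert d (key x) (f x) v hv with rfl | hv'
    · exact hl x List.mem_cons_self
    · exact hd v hv'

-- applying g to every inserted value commutes with building the dict
theorem map_items_foldl_insert {κ β γ δ : Type} [BEq κ] [LawfulBEq κ] [DecidableEq κ]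
    (g : γ → δ) :
    ∀ (l : List β) (key : β → κ) (v : β → γ) (d1 : PySem.Dict κ γ) (d2 : PySem.Dict κ δ),
      d2.items = d1.items.map (fun p => (p.1, g p.2)) →
      (l.foldl (fun d x => d.insert (key x) (v x)) d1).items.map (fun p => (p.1, g p.2))
        = (l.foldl (fun d x => d.insert (key x) (g (v x))) d2).items := by
  intro l
  induction l with
  | nil => intro key v d1 d2 hrel; simpa using hrel.symm
  | cons x rest ih =>
    intro key v d1 d2 hrel
    simp only [List.foldl_cons]
    apply ih
    have hkeys : d2.keys = d1.keys := by
      simp only [PySem.Dict.keys, hrel, List.map_map]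
      rfl
    have hcont : d2.contains (key x) = d1.contains (key x) := by
      rw [PySem.Dict.contains_eq_decide_mem_keys, PySem.Dict.contains_eq_decide_mem_keys, hkeys]
    by_cases hc : d1.contains (key x) = true
    · rw [PySem.Dict.items_insert_of_contains d2 _ (by rw [hcont]; exact hc),
        PySem.Dict.items_insert_of_contains d1 _ hc, hrel,
        List.map_map, List.map_map]
      apply List.map_congr_left
      intro p _
      by_cases hp : p.1 = key x <;> simp [Function.comp, hp]
    · rw [PySem.Dict.items_insert_of_not_contains d2 _ (by rw [hcont]; simpa using hc),
        PySem.Dict.items_insert_of_not_contains d1 _ (by simpa using hc), hrel]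
      simp

-- A's pairing loop over the grouped items, in B's canonical-key form
theorem pairA_eq (hits : List (String × Int)) :
    pvPairA (hits.foldl (fun d p => d.modify p.1 [] (· ++ [p.2])) PySem.Dict.empty)
      = (hits.foldl (fun d p => d.modify p.1 [] (· ++ [p.2])) PySem.Dict.empty).items.foldl
          (fun p kv => p.insert (pvKeyOf kv) (pvValOf hits kv)) PySem.Dict.empty := by
  unfold pvPairA
  apply PySem.List.foldl_congr_mem
  intro p kv _
  dsimp only
  rw [merFold_getD hits (pvReverseComplement kv.1)]
  unfold pvKeyOf pvValOf
  rcases lt_trichotomy kv.1 (pvReverseComplement kv.1) with hlt | heq | hgt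
  · have hne : ¬ (kv.1 == pvReverseComplement kv.1) = true := by
      simp only [beq_iff_eq]; exact ne_of_lt hlt
    rw [if_pos hlt]
    simp only [if_neg hne, min_eq_left hlt.le]
  · rw [if_neg (heq ▸ lt_irrefl kv.1), if_neg (heq ▸ lt_irrefl kv.1)]
    simp only [if_pos (beq_iff_eq.mpr heq)]
  · have hne : ¬ (kv.1 == pvReverseComplement kv.1) = true := by
      simp only [beq_iff_eq]; exact (ne_of_lt hgt).symm
    rw [if_neg (asymm hgt), if_pos hgt,
      (PySem.List.sorted_id_eq_sorted_id_iff_perm _ _).mpr List.perm_append_comm]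
    simp only [if_neg hne, min_eq_right hgt.le]

-- ===== VERDICT (by name: the statement is the Claim_ definition above) =====
set_option maxHeartbeats 1000000 in
theorem get_kmer_clumps_spec : Claim_equal_get_kmer_clumps := by
  intro sequence alphabet k window times _ hpre
  have hpre' : (1 : Int) ≤ times := hpre
  unfold Spec_get_kmer_clumps
  unfold get_kmer_clumps get_kmer_clumps_alt
  rw [merA_eq, groupB_eq, pairA_eq]
  dsimp only
  simp only [pvRevCompB_eq]
  generalize hH : pvHitsB sequence alphabet k = hits
  have hvals : ∀ w ∈ (List.foldl (fun p kv => p.insert (pvKeyOf kv) (pvValOf hits kv))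
      PySem.Dict.empty
      (List.foldl (fun d p => d.modify p.1 [] fun x => x ++ [p.2]) PySem.Dict.empty
        hits).items).values, w.Pairwise (· ≤ ·) := by
    refine pv_values_fold_prop _ _ PySem.Dict.empty pvKeyOf (pvValOf hits)
      (by intro w hw; cases hw) ?_
    intro kv hkv
    unfold pvValOf
    split_ifs
    · have hkv2 : kv.2 = (List.foldl (fun d p => d.modify p.1 [] fun x => x ++ [p.2])
          PySem.Dict.empty hits).getD kv.1 [] :=
        (PySem.Dict.getD_of_mem_items _ (by simpa using hkv) (merFold_nodup hits) []).symm
      rw [hkv2, merFold_getD]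
      rw [← hH]
      exact (pvPos_hits_sorted sequence alphabet k kv.1).imp le_of_lt
    · simpa using PySem.List.sorted_pairwise (kv.2 ++ pvPos hits (pvReverseComplement kv.1))
        (fun x => x)
  have hndP : (((List.foldl (fun p kv => p.insert (pvKeyOf kv) (pvValOf hits kv))
      PySem.Dict.empty
      (List.foldl (fun d p => d.modify p.1 [] fun x => x ++ [p.2]) PySem.Dict.empty
        hits).items).items).map (·.1)).Nodup := by
    have := PySem.Dict.nodup_keys_foldl_insert_key
      ((List.foldl (fun d p => d.modify p.1 [] fun x => x ++ [p.2]) PySem.Dict.empty hits).items)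
      pvKeyOf (fun _ kv => pvValOf hits kv) PySem.Dict.empty (by simp)
    simpa [PySem.Dict.keys] using this
  rw [outer_start (window - k) times _ PySem.Dict.empty (by intro p _; rfl) hndP]
  rw [show (List.foldl
        (fun cl kv => cl.insert kv.1 (pvClumpA [] kv.2 (window - k) times)) PySem.Dict.empty
        ((List.foldl (fun p kv => p.insert (pvKeyOf kv) (pvValOf hits kv)) PySem.Dict.empty
          (List.foldl (fun d p => d.modify p.1 [] fun x => x ++ [p.2]) PySem.Dict.empty
            hits).items).items)).items
      = ((List.foldl (fun p kv => p.insert (pvKeyOf kv) (pvValOf hits kv)) PySem.Dict.empty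
          (List.foldl (fun d p => d.modify p.1 [] fun x => x ++ [p.2]) PySem.Dict.empty
            hits).items).items).map
          (fun kv => (kv.1, pvClumpA [] kv.2 (window - k) times)) by
    simpa using PySem.Dict.items_foldl_insert_fresh _ (fun kv : String × List Int => kv.1)
      (fun kv : String × List Int => pvClumpA [] kv.2 (window - k) times) PySem.Dict.empty
      (by intro a _; rfl) hndP]
  rw [List.map_congr_left (fun kv hkv => by
    have hsortd : kv.2.Pairwise (· ≤ ·) := hvals kv.2 (List.mem_map_of_mem hkv)
    rw [clumpA_eq_search kv.2 (window - k) times hsortd hpre'])]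
  refine Eq.trans (map_items_foldl_insert (fun pos => pvClumpSearch pos (window - k) times) _
    pvKeyOf (pvValOf hits) PySem.Dict.empty PySem.Dict.empty rfl) ?_
  refine congrArg PySem.Dict.items (PySem.List.foldl_congr_mem _ _ _ _ ?_)
  intro r kv _
  dsimp only
  unfold pvKeyOf pvValOf
  by_cases h : (kv.1 == pvReverseComplement kv.1) = true
  · rw [if_pos h]
    simp only [if_pos h]
  · rw [if_neg h]
    simp only [if_neg h, merFold_getD]
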